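-- pv_equiv track=rewrite | github.com/fsglobal/Validador_promociones | modulos/validador.py | validar_multivalor
-- ===== SOURCE A (Python) =====
-- def validar_multivalor(vals_excel, vals_export, etiqueta):
--     detalles = []
--     ok = True
--
--     vals_excel = sorted(set(vals_excel))
--     vals_export = sorted(set(vals_export))
--
--     for v in vals_excel:
--         if v in vals_export:
--             detalles.append(("OK", f"{etiqueta} (<span class='text-blue'>{v}</span>) Correcto entre archivo Excel y Export"))
--         else:
--             ok = False
--             detalles.append(("ERR", f"{etiqueta} (<span class='text-blue'>{v}</span>) está en el Excel y no se encuentra asociado en el archivo Export"))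
--
--     for v in vals_export:
--         if v not in vals_excel:
--             ok = False
--             detalles.append(("ERR", f"{etiqueta} (<span class='text-blue'>{v}</span>) está en el archivo Export y no se encuentra en el Excel"))
--
--     return ok, detalles
-- ===== SOURCE B (Python) =====
-- def validar_multivalor(vals_excel, vals_export, etiqueta):
--     a = sorted(set(vals_excel))
--     b = sorted(set(vals_export))
--     ok = True
--     detalles = []
--     export_only = []
--     i = j = 0
--     while i < len(a) or j < len(b):
--         if j == len(b) or (i < len(a) and a[i] < b[j]):
--             ok = False
--             detalles.append(("ERR", f"{etiqueta} (<span class='text-blue'>{a[i]}</span>) está en el Excel y no se encuentra asociado en el archivo Export"))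
--             i += 1
--         elif i == len(a) or b[j] < a[i]:
--             ok = False
--             export_only.append(("ERR", f"{etiqueta} (<span class='text-blue'>{b[j]}</span>) está en el archivo Export y no se encuentra en el Excel"))
--             j += 1
--         else:
--             detalles.append(("OK", f"{etiqueta} (<span class='text-blue'>{a[i]}</span>) Correcto entre archivo Excel y Export"))
--             i += 1
--             j += 1
--     detalles.extend(export_only)
--     return ok, detalles
-- ===== Notes on version B (the rewrite author's own statement) =====
-- stated objective: faster
-- what changed: Replaces A's two loops with linear membership scans over the sorted deduplicated lists by a single two-pointer merge of the two sorted lists, deferring Export-only errors so the output order is preserved.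
import Mathlib
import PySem

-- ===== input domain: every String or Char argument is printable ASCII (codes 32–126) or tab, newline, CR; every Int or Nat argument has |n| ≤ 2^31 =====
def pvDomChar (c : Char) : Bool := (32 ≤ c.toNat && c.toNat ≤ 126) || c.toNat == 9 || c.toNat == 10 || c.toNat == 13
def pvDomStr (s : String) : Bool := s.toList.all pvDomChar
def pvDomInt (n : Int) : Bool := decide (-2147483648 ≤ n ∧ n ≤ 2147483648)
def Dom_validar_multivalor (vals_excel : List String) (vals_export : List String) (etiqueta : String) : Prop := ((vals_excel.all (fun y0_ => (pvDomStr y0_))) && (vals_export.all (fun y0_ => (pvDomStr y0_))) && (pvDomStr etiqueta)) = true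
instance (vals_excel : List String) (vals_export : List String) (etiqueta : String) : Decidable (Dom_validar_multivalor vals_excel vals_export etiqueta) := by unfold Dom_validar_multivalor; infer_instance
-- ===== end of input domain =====

-- B replaces A's two quadratic membership-scan loops over sorted(set(...)) by a single
-- linear two-pointer merge of the two sorted duplicate-free lists (objective: faster).

-- shared message builders (the f-strings of both Pythons)
def pvMsgOK (et v : String) : String := et ++ " (<span class='text-blue'>" ++ v ++ "</span>) Correcto entre archivo Excel y Export"
def pvMsgExcel (et v : String) : String := et ++ " (<span class='text-blue'>" ++ v ++ "</span>) está en el Excel y no se encuentra asociado en el archivo Export"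
def pvMsgExport (et v : String) : String := et ++ " (<span class='text-blue'>" ++ v ++ "</span>) está en el archivo Export y no se encuentra en el Excel"

-- ===== PORT A =====
def validar_multivalor (vals_excel : List String) (vals_export : List String) (etiqueta : String) : Bool × (List (String × String)) :=
  let a := PySem.List.sorted (PySem.Set.ofList vals_excel) (fun x => x) false
  let b := PySem.List.sorted (PySem.Set.ofList vals_export) (fun x => x) false
  let st1 : Bool × List (String × String) := a.foldl (fun st v =>
      if v ∈ b then (st.1, st.2 ++ [("OK", pvMsgOK etiqueta v)])
      else (false, st.2 ++ [("ERR", pvMsgExcel etiqueta v)])) (true, [])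
  let st2 := b.foldl (fun st v =>
      if v ∈ a then st else (false, st.2 ++ [("ERR", pvMsgExport etiqueta v)])) st1
  st2

-- ===== PORT B =====
-- the while loop with indices i, j of Source B, as structural recursion on the two sorted lists
def pvMerge (et : String) : List String → List String → Bool × List (String × String) × List (String × String)
  | [], [] => (true, [], [])
  | x :: xs, [] =>
      let r := pvMerge et xs []
      (false, ("ERR", pvMsgExcel et x) :: r.2.1, r.2.2)
  | [], y :: ys =>
      let r := pvMerge et [] ys
      (false, r.2.1, ("ERR", pvMsgExport et y) :: r.2.2)
  | x :: xs, y :: ys =>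
      if x < y then
        let r := pvMerge et xs (y :: ys)
        (false, ("ERR", pvMsgExcel et x) :: r.2.1, r.2.2)
      else if y < x then
        let r := pvMerge et (x :: xs) ys
        (false, r.2.1, ("ERR", pvMsgExport et y) :: r.2.2)
      else
        let r := pvMerge et xs ys
        (r.1, ("OK", pvMsgOK et x) :: r.2.1, r.2.2)
  termination_by xs ys => xs.length + ys.length

def validar_multivalor_alt (vals_excel : List String) (vals_export : List String) (etiqueta : String) : Bool × (List (String × String)) :=
  let a := PySem.List.sorted (PySem.Set.ofList vals_excel) (fun x => x) false
  let b := PySem.List.sorted (PySem.Set.ofList vals_export) (fun x => x) false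
  let r := pvMerge etiqueta a b
  (r.1, r.2.1 ++ r.2.2)

-- ===== PRECONDITION & SPEC =====
def Spec_validar_multivalor (vals_excel : List String) (vals_export : List String) (etiqueta : String) (out : Bool × (List (String × String))) : Prop := out = validar_multivalor_alt vals_excel vals_export etiqueta
instance (vals_excel : List String) (vals_export : List String) (etiqueta : String) (out : Bool × (List (String × String))) : Decidable (Spec_validar_multivalor vals_excel vals_export etiqueta out) := by unfold Spec_validar_multivalor; infer_instance

-- ===== CLAIM (what is proved, stated in full; the proofs are below) =====
def Claim_equal_validar_multivalor : Prop := ∀ (vals_excel : List String) (vals_export : List String) (etiqueta : String), Dom_validar_multivalor vals_excel vals_export etiqueta → Spec_validar_multivalor vals_excel vals_export etiqueta (validar_multivalor vals_excel vals_export etiqueta)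

-- ===== LEMMAS AND PROOFS =====

-- A's first loop: a fold appending one tagged message per element of a
theorem pv_loop1 (et : String) (b : List String) (a : List String)
    (ok0 : Bool) (d0 : List (String × String)) :
    a.foldl (fun st v =>
      if v ∈ b then (st.1, st.2 ++ [("OK", pvMsgOK et v)])
      else (false, st.2 ++ [("ERR", pvMsgExcel et v)])) (ok0, d0)
    = (ok0 && a.all (fun v => decide (v ∈ b)),
       d0 ++ a.map (fun v => if v ∈ b then ("OK", pvMsgOK et v) else ("ERR", pvMsgExcel et v))) := by
  induction a generalizing ok0 d0 with
  | nil => simp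
  | cons x xs ih =>
    by_cases hx : x ∈ b <;> simp [hx, ih]

-- A's second loop
theorem pv_loop2 (et : String) (a : List String) (b : List String)
    (ok0 : Bool) (d0 : List (String × String)) :
    b.foldl (fun st v =>
      if v ∈ a then st else (false, st.2 ++ [("ERR", pvMsgExport et v)])) (ok0, d0)
    = (ok0 && b.all (fun v => decide (v ∈ a)),
       d0 ++ (b.filter (fun v => decide (v ∉ a))).map (fun v => ("ERR", pvMsgExport et v))) := by
  induction b generalizing ok0 d0 with
  | nil => simp
  | cons y ys ih =>
    by_cases hy : y ∈ a <;> simp [hy, ih]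

theorem pv_not_mem_of_lt_head {x y : String} {ys : List String}
    (h : (y :: ys).Pairwise (· < ·)) (hxy : x < y) : x ∉ y :: ys := by
  intro hm
  rcases List.mem_cons.1 hm with rfl | hm
  · exact lt_irrefl _ hxy
  · exact lt_asymm hxy ((List.pairwise_cons.1 h).1 _ hm)

theorem pv_all_congr {α : Type} {p q : α → Bool} :
    ∀ {zs : List α}, (∀ v ∈ zs, p v = q v) → zs.all p = zs.all q := by
  intro zs
  induction zs with
  | nil => intro _; rfl
  | cons z zs ih =>
    intro h
    simp only [List.all_cons, h z (List.mem_cons_self), ih (fun v hv => h v (List.mem_cons_of_mem _ hv))]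

-- B's merge = (both-inclusion flag, A's first-loop messages, A's second-loop messages), for sorted inputs
theorem pv_merge_spec (et : String) :
    ∀ (a b : List String), a.Pairwise (· < ·) → b.Pairwise (· < ·) →
    pvMerge et a b
    = (a.all (fun v => decide (v ∈ b)) && b.all (fun v => decide (v ∈ a)),
       a.map (fun v => if v ∈ b then ("OK", pvMsgOK et v) else ("ERR", pvMsgExcel et v)),
       (b.filter (fun v => decide (v ∉ a))).map (fun v => ("ERR", pvMsgExport et v))) := by
  intro a
  induction a with
  | nil =>
    intro b _
    induction b with
    | nil => intro _; simp [pvMerge]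
    | cons y ys ihb =>
      intro hb
      rw [pvMerge, ihb hb.of_cons]
      simp
  | cons x xs iha =>
    intro b ha
    have hxlt : ∀ v ∈ xs, x < v := (List.pairwise_cons.1 ha).1
    induction b with
    | nil =>
      intro _
      rw [pvMerge, iha [] ha.of_cons List.Pairwise.nil]
      simp
    | cons y ys ihb =>
      intro hb
      have hylt : ∀ v ∈ ys, y < v := (List.pairwise_cons.1 hb).1
      rw [pvMerge]
      rcases lt_trichotomy x y with hxy | hxy | hxy
      · -- Excel-only head: x < y
        simp only [if_pos hxy, iha (y :: ys) ha.of_cons hb, Prod.mk.injEq]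
        have hxnot : x ∉ y :: ys := pv_not_mem_of_lt_head hb hxy
        have hfil : List.filter (fun v => decide (v ∉ xs)) (y :: ys)
            = List.filter (fun v => decide (v ∉ x :: xs)) (y :: ys) := by
          apply List.filter_congr
          intro v hv
          have hne : ¬ v = x := by
            rcases List.mem_cons.1 hv with rfl | hv'
            · exact fun h => lt_irrefl _ (h ▸ hxy)
            · exact fun h => lt_irrefl _ (h ▸ (hxy.trans (hylt _ hv')))
          simp [List.mem_cons, hne]
        refine ⟨?_, ?_, ?_⟩
        · have h0 : decide (x ∈ y :: ys) = false := decide_eq_false hxnot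
          rw [List.all_cons, h0, Bool.false_and, Bool.false_and]
        · rw [List.map_cons, if_neg hxnot]
        · exact congrArg _ hfil
      · -- equal heads
        subst hxy
        simp only [if_neg (lt_irrefl x), iha ys ha.of_cons hb.of_cons, Prod.mk.injEq]
        have hne_xs : ∀ v ∈ xs, ¬ v = x := fun v hv h => lt_irrefl _ (h ▸ hxlt v hv)
        have hne_ys : ∀ v ∈ ys, ¬ v = x := fun v hv h => lt_irrefl _ (h ▸ hylt v hv)
        have ca : xs.all (fun v => decide (v ∈ ys)) = xs.all (fun v => decide (v ∈ x :: ys)) :=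
          pv_all_congr (fun v hv => by simp [List.mem_cons, hne_xs v hv])
        have cb : ys.all (fun v => decide (v ∈ xs)) = ys.all (fun v => decide (v ∈ x :: xs)) :=
          pv_all_congr (fun v hv => by simp [List.mem_cons, hne_ys v hv])
        have cd : xs.map (fun v => if v ∈ ys then ("OK", pvMsgOK et v) else ("ERR", pvMsgExcel et v))
            = xs.map (fun v => if v ∈ x :: ys then ("OK", pvMsgOK et v) else ("ERR", pvMsgExcel et v)) := by
          apply List.map_congr_left
          intro v hv
          simp [List.mem_cons, hne_xs v hv]
        have ce : ys.filter (fun v => decide (v ∉ xs))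
            = ys.filter (fun v => decide (v ∉ x :: xs)) :=
          List.filter_congr (fun v hv => by simp [List.mem_cons, hne_ys v hv])
        refine ⟨?_, ?_, ?_⟩
        · have h1 : decide (x ∈ x :: ys) = true := decide_eq_true (List.mem_cons_self)
          have h2 : decide (x ∈ x :: xs) = true := decide_eq_true (List.mem_cons_self)
          rw [List.all_cons, List.all_cons, h1, h2, Bool.true_and, Bool.true_and, ca, cb]
        · rw [List.map_cons, if_pos (List.mem_cons_self), cd]
        · have h3 : decide (x ∉ x :: xs) = false := by
            simp [List.mem_cons]
          rw [List.filter_cons, h3, if_neg (by simp), ce]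
      · -- Export-only head: y < x
        simp only [if_neg (lt_asymm hxy), if_pos hxy, ihb hb.of_cons, Prod.mk.injEq]
        have hynot : y ∉ x :: xs := pv_not_mem_of_lt_head ha hxy
        have hne : ∀ v ∈ x :: xs, ¬ v = y := by
          intro v hv
          rcases List.mem_cons.1 hv with rfl | hv'
          · exact fun h => lt_irrefl _ (h ▸ hxy)
          · exact fun h => lt_irrefl _ (h ▸ (hxy.trans (hxlt _ hv')))
        have cd : (x :: xs).map (fun v => if v ∈ ys then ("OK", pvMsgOK et v) else ("ERR", pvMsgExcel et v))
            = (x :: xs).map (fun v => if v ∈ y :: ys then ("OK", pvMsgOK et v) else ("ERR", pvMsgExcel et v)) := by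
          apply List.map_congr_left
          intro v hv
          simp [List.mem_cons, hne v hv]
        refine ⟨?_, ?_, ?_⟩
        · have h0 : decide (y ∈ x :: xs) = false := decide_eq_false hynot
          rw [List.all_cons (l := ys), h0, Bool.false_and, Bool.and_false]
        · exact cd
        · have h4 : decide (y ∉ x :: xs) = true := decide_eq_true hynot
          rw [List.filter_cons, h4, if_pos rfl, List.map_cons]

-- ===== VERDICT (by name: the statement is the Claim_ definition above) =====
theorem validar_multivalor_spec : Claim_equal_validar_multivalor := by
  intro ve vx et _
  unfold Spec_validar_multivalor validar_multivalor validar_multivalor_alt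
  simp only [pv_loop1, pv_loop2,
    pv_merge_spec et _ _ (PySem.List.sorted_ofList_pairwise_lt ve) (PySem.List.sorted_ofList_pairwise_lt vx)]
  simp
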